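-- pv_equiv track=rewrite | github.com/input-output-hk/atala-prism | prism-backend/deprecated/docs/cardano/scripts/fee_estimation.py | schema_v3
-- ===== SOURCE A (Python) =====
-- BYTESTRING_LIMIT = 64
--
-- PRISM_INDEX = 21325
--
-- def schema_v3(payload):
--     payload_bytes = [b & 0xff for b in payload]
--     payload_chunks = []
--     for i in range(0, len(payload_bytes), BYTESTRING_LIMIT):
--         payload_chunks.append(payload_bytes[i:i + BYTESTRING_LIMIT])
--
--     payload_chunks_str = [f'"0x{bytes(chunk).hex()}"' for chunk in payload_chunks]
--     payload_str = ', '.join(payload_chunks_str)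
--     return f'''{{
--     "{PRISM_INDEX}": {{
--         "v": 3,
--         "c": [{payload_str}]
--     }}
-- }}'''
-- ===== SOURCE B (Python) =====
-- BYTESTRING_LIMIT = 64
--
-- PRISM_INDEX = 21325
--
--
-- def _hexdigit(d):
--     return chr(48 + d) if d < 10 else chr(87 + d)
--
--
-- def schema_v3(payload):
--     # Single pass over the bytes: emit the opening '"0x' / the '", "0x'
--     # chunk separator inline at each 64-byte boundary, then the two hex
--     # digits of the masked byte; close the last chunk at the end.
--     out = []
--     for idx, b in enumerate(payload):
--         if idx == 0:
--             out.append('"0x')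
--         elif idx % BYTESTRING_LIMIT == 0:
--             out.append('", "0x')
--         b &= 0xff
--         out.append(_hexdigit(b // 16))
--         out.append(_hexdigit(b % 16))
--     if payload:
--         out.append('"')
--     payload_str = ''.join(out)
--     return f'''{{
--     "{PRISM_INDEX}": {{
--         "v": 3,
--         "c": [{payload_str}]
--     }}
-- }}'''
-- ===== Notes on version B (the rewrite author's own statement) =====
-- stated objective: alternative
-- what changed: B makes a single enumerate pass that emits the chunk separator inline at each 64-byte boundary and the two hex digits per byte into one accumulator, instead of materializing 64-byte chunk lists, hex-encoding each chunk, and joining them.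
import Mathlib
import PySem

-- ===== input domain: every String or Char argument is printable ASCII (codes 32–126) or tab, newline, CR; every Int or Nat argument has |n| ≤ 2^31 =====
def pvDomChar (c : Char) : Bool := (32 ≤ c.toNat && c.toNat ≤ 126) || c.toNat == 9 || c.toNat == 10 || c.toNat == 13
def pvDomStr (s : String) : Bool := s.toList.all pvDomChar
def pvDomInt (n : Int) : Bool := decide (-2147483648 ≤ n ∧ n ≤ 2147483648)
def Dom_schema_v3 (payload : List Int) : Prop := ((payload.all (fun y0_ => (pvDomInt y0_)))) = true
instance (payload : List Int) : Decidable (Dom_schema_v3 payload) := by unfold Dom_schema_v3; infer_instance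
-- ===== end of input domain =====

-- B replaces A's three staged passes (slice into 64-byte chunks, hex each chunk, join)
-- by one enumerate pass emitting separators and hex digits into a single accumulator
-- (objective: alternative decomposition, same O(n) cost).

-- ===== PORT A =====
-- bytes(...).hex() is not in PySem: hand-ported, exact for bytes 0..255 (lowercase hex)
def hexDigit (n : Nat) : Char := if n < 10 then Char.ofNat (48 + n) else Char.ofNat (87 + n)
def byteHexChars (b : Int) : List Char := [hexDigit (b.toNat / 16), hexDigit (b.toNat % 16)]
def tplPre : List Char := "{\n    \"21325\": {\n        \"v\": 3,\n        \"c\": [".toList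
def tplPost : List Char := "]\n    }\n}".toList

def schema_v3 (payload : List Int) : String :=
  let payload_bytes : List Int := payload.map (fun b => Int.land b 255)
  let payload_chunks : List (List Int) :=
    (PySem.List.pyRange 0 (PySem.List.len payload_bytes) 64).foldl
      (fun acc i => acc ++ [PySem.List.slice payload_bytes (some i) (some (i + 64))]) []
  let payload_chunks_str : List (List Char) :=
    payload_chunks.map (fun chunk => '"' :: '0' :: 'x' :: chunk.flatMap byteHexChars ++ ['"'])
  let payload_str : List Char := PySem.Chars.join ", ".toList payload_chunks_str
  String.ofList (tplPre ++ payload_str ++ tplPost)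

-- ===== PORT B =====
-- _hexdigit(d) = chr(48+d) if d < 10 else chr(87+d)
def hexDigitI (d : Int) : Char :=
  if d < 10 then Char.ofNat (48 + d).toNat else Char.ofNat (87 + d).toNat

def schema_v3_alt (payload : List Int) : String :=
  let out : List Char :=
    (PySem.List.enumerate payload 0).foldl
      (fun acc p =>
        let acc := acc ++
          (if p.1 = 0 then "\"0x".toList
           else if PySem.Int.mod p.1 64 = 0 then "\", \"0x".toList else [])
        let b := Int.land p.2 255
        acc ++ [hexDigitI (PySem.Int.floordiv b 16), hexDigitI (PySem.Int.mod b 16)]) []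
  let payload_str : List Char := out ++ (if payload = [] then [] else ['"'])
  String.ofList (tplPre ++ payload_str ++ tplPost)

-- ===== PRECONDITION & SPEC =====
def Spec_schema_v3 (payload : List Int) (out : String) : Prop := out = schema_v3_alt payload
instance (payload : List Int) (out : String) : Decidable (Spec_schema_v3 payload out) := by unfold Spec_schema_v3; infer_instance

-- ===== CLAIM (what is proved, stated in full; the proofs are below) =====
def Claim_equal_schema_v3 : Prop := ∀ (payload : List Int), Dom_schema_v3 payload → Spec_schema_v3 payload (schema_v3 payload)

-- ===== LEMMAS AND PROOFS =====

-- chunking into blocks of size c+1 (proof-side reference shape)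
def chunksOf {α : Type} (c : Nat) : List α → List (List α)
  | [] => []
  | x :: xs => (x :: xs.take c) :: chunksOf c (xs.drop c)
termination_by l => l.length
decreasing_by simp only [List.length_drop, List.length_cons]; omega

theorem chunksOf_nil {α : Type} (c : Nat) : chunksOf c ([] : List α) = [] := by
  rw [chunksOf]

theorem chunksOf_eq_cons {α : Type} (c : Nat) (l : List α) (h : l ≠ []) :
    chunksOf c l = l.take (c + 1) :: chunksOf c (l.drop (c + 1)) := by
  cases l with
  | nil => exact absurd rfl h
  | cons x xs => rw [chunksOf]; simp

theorem foldl_append_map {α β : Type} (f : α → β) :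
    ∀ (r : List α) (init : List β),
      r.foldl (fun acc i => acc ++ [f i]) init = init ++ r.map f := by
  intro r
  induction r with
  | nil => simp
  | cons a t ih => intro init; simp [List.foldl_cons, ih]

theorem range_map_chunks {α : Type} (c : Nat) (hc : 0 < c) :
    ∀ (l : List α),
      (List.range ((l.length + c - 1) / c)).map (fun k => (l.drop (c * k)).take c)
        = chunksOf (c - 1) l := by
  intro l
  induction hn : l.length using Nat.strong_induction_on generalizing l with
  | _ n ih =>
    subst hn
    cases l with
    | nil =>
      rw [show (([] : List α).length + c - 1) / c = 0 from Nat.div_eq_of_lt (by simp; omega)]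
      simp [chunksOf_nil]
    | cons x xs =>
      have hlen : (x :: xs).length = xs.length + 1 := by simp
      have hstep : ((x :: xs).length + c - 1) / c
          = (((x :: xs).drop c).length + c - 1) / c + 1 := by
        rw [List.length_drop, hlen]
        by_cases hle : xs.length + 1 ≤ c
        · have h1 : (xs.length + 1 + c - 1) / c = 1 :=
            Nat.div_eq_of_lt_le (by omega) (by omega)
          have h2 : (xs.length + 1 - c + c - 1) / c = 0 := Nat.div_eq_of_lt (by omega)
          omega
        · have : xs.length + 1 + c - 1 = (xs.length + 1 - c + c - 1) + c := by omega
          rw [this, Nat.add_div_right _ hc]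
      rw [hstep, List.range_succ_eq_map, List.map_cons, List.map_map]
      have htail : ((List.range ((((x :: xs).drop c).length + c - 1) / c)).map
          ((fun k => ((x :: xs).drop (c * k)).take c) ∘ Nat.succ))
          = chunksOf (c - 1) ((x :: xs).drop c) := by
        have := ih ((x :: xs).drop c).length
          (by rw [List.length_drop]; simp; omega) ((x :: xs).drop c) rfl
        rw [← this]
        apply List.map_congr_left
        intro k _
        simp only [Function.comp, List.drop_drop]
        congr 1
        simp only [Nat.succ_eq_add_one]
        ring_nf
      rw [htail, Nat.mul_zero, List.drop_zero,
        chunksOf_eq_cons (c - 1) (x :: xs) (by simp), Nat.sub_add_cancel hc]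

-- the per-chunk pyRange/slice loop of port A is the chunksOf decomposition
theorem pyRange_slice_chunks {α : Type} (c : Nat) (hc : 0 < c) (ci : Int) (hci : ci = (c : Int))
    (l : List α) :
    (PySem.List.pyRange 0 (PySem.List.len l) ci).map
        (fun i => PySem.List.slice l (some i) (some (i + ci)))
      = chunksOf (c - 1) l := by
  subst hci
  rw [← range_map_chunks c hc l]
  have hpos : (0 : Int) < (c : Int) := by exact_mod_cast hc
  rw [PySem.List.pyRange_of_pos 0 (PySem.List.len l) hpos]
  have hcount : (if (0 : Int) < PySem.List.len l
      then ((PySem.List.len l - 0 + (c : Int) - 1) / (c : Int)).toNat else 0)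
      = (l.length + c - 1) / c := by
    simp only [PySem.List.len]
    by_cases hl : (0 : Int) < (l.length : Int)
    · rw [if_pos hl]
      have : ((l.length : Int) - 0 + (c : Int) - 1) = ((l.length + c - 1 : Nat) : Int) := by
        rw [Nat.cast_sub (by omega)]
        push_cast; ring
      rw [this, ← Int.natCast_div, Int.toNat_natCast]
    · rw [if_neg hl]
      have : l.length = 0 := by omega
      rw [this]
      exact (Nat.div_eq_of_lt (by omega)).symm
  rw [hcount, List.map_map]
  apply List.map_congr_left
  intro k _
  simp only [Function.comp]
  have h0 : (0 : Int) + (c : Int) * (k : Int) = ((c * k : Nat) : Int) := by push_cast; ring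
  have h1 : ((c * k : Nat) : Int) + (c : Int) = ((c * k : Nat) : Int) + ((c : Nat) : Int) := rfl
  rw [h0, h1, PySem.List.slice_natCast_add]

-- chunking commutes with map
theorem chunksOf_map {α β : Type} (c : Nat) (f : α → β) :
    ∀ (l : List α), chunksOf c (l.map f) = (chunksOf c l).map (List.map f) := by
  intro l
  induction hn : l.length using Nat.strong_induction_on generalizing l with
  | _ n ih =>
    subst hn
    cases l with
    | nil => simp [chunksOf_nil]
    | cons x xs =>
      rw [chunksOf_eq_cons c (x :: xs) (by simp),
        chunksOf_eq_cons c ((x :: xs).map f) (by simp), List.map_cons]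
      have hmc : f x :: List.map f xs = List.map f (x :: xs) := rfl
      rw [hmc, ← List.map_take, ← List.map_drop]
      congr 1
      exact ih ((x :: xs).drop (c + 1)).length
        (by simp only [List.length_drop, List.length_cons]; omega) _ rfl

-- masked byte → its two hex chars (reference form, = bytes([...]).hex() on one byte)
def hp (b : Int) : List Char := byteHexChars (Int.land b 255)

-- B's emission pass as a structural recursion
def emit : Int → List Int → List Char
  | _, [] => []
  | i, b :: t =>
      (if i = 0 then "\"0x".toList
       else if PySem.Int.mod i 64 = 0 then "\", \"0x".toList else []) ++ hp b ++ emit (i + 1) t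

-- A's join of quoted hex chunks, as a function of the unmasked list
def J63 (l : List Int) : List Char :=
  PySem.Chars.join ", ".toList
    ((chunksOf 63 l).map (fun ck => '"' :: '0' :: 'x' :: ck.flatMap hp ++ ['"']))

-- B's per-byte hex pair is byteHexChars of the masked byte
theorem hexpair_eq (b : Int) :
    [hexDigitI (PySem.Int.floordiv (Int.land b 255) 16),
     hexDigitI (PySem.Int.mod (Int.land b 255) 16)] = hp b := by
  have hnn : 0 ≤ Int.land b 255 := by cases b <;> simp [Int.land]
  obtain ⟨m, hm⟩ : ∃ m : Nat, Int.land b 255 = (m : Int) := ⟨(Int.land b 255).toNat, (Int.toNat_of_nonneg hnn).symm⟩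
  have hdig : ∀ n : Nat, hexDigitI ((n : Nat) : Int) = hexDigit n := by
    intro n
    unfold hexDigitI hexDigit
    have : ((48 : Int) + (n : Int)).toNat = 48 + n := by omega
    have h2 : ((87 : Int) + (n : Int)).toNat = 87 + n := by omega
    by_cases hlt : (n : Int) < 10
    · rw [if_pos hlt, if_pos (by exact_mod_cast hlt), this]
    · rw [if_neg hlt, if_neg (by exact_mod_cast hlt), h2]
  unfold hp byteHexChars
  rw [hm, show (16 : Int) = ((16 : Nat) : Int) from rfl,
    PySem.Int.floordiv_natCast, PySem.Int.mod_natCast, hdig, hdig, Int.toNat_natCast]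

-- the foldl over enumerate is emit
theorem foldl_enumerate_emit :
    ∀ (l : List Int) (i : Int) (acc : List Char),
      (PySem.List.enumerate l i).foldl
        (fun acc p =>
          (acc ++
            (if p.1 = 0 then "\"0x".toList
             else if PySem.Int.mod p.1 64 = 0 then "\", \"0x".toList else [])) ++
          [hexDigitI (PySem.Int.floordiv (Int.land p.2 255) 16),
           hexDigitI (PySem.Int.mod (Int.land p.2 255) 16)]) acc
      = acc ++ emit i l := by
  intro l
  induction l with
  | nil => intro i acc; simp [PySem.List.enumerate_nil, emit]
  | cons b t ih =>
    intro i acc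
    rw [PySem.List.enumerate_cons, List.foldl_cons, ih, emit, hexpair_eq]
    simp [List.append_assoc]

-- a run of bytes none of whose indices is a 64-boundary emits only hex pairs
theorem emit_no_sep :
    ∀ (c : List Int) (i : Int) (t : List Int),
      (∀ j : Nat, j < c.length → PySem.Int.mod (i + j) 64 ≠ 0) →
      emit i (c ++ t) = c.flatMap hp ++ emit (i + c.length) t := by
  intro c
  induction c with
  | nil => intro i t _; rw [List.nil_append, List.flatMap_nil, List.nil_append]; norm_num
  | cons a r ih =>
    intro i t h
    have h0 : PySem.Int.mod i 64 ≠ 0 := by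
      have := h 0 (by simp)
      simpa using this
    have hi0 : i ≠ 0 := by
      intro hi; apply h0; rw [hi]; rfl
    rw [List.cons_append, emit, if_neg hi0, if_neg h0, List.nil_append, ih (i + 1) t
      (fun j hj => by
        have := h (j + 1) (by simp; omega)
        have harith : i + 1 + (j : Int) = i + ((j + 1 : Nat) : Int) := by push_cast; ring
        rw [harith]; exact this)]
    have hidx : i + 1 + (r.length : Int) = i + ((r.length + 1 : Nat) : Int) := by
      push_cast; ring
    simp [List.flatMap_cons, List.append_assoc, hidx]

theorem mod64_boundary (k : Nat) : PySem.Int.mod ((64 * (k + 1) : Nat) : Int) 64 = 0 := by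
  rw [PySem.Int.mod_eq_emod_of_pos (by norm_num)]
  omega

theorem mod64_ne (i : Int) (hmod : PySem.Int.mod i 64 = 0) (j : Nat)
    (h1 : 1 ≤ j) (h2 : j ≤ 63) : PySem.Int.mod (i + j) 64 ≠ 0 := by
  rw [PySem.Int.mod_eq_emod_of_pos (by norm_num)] at *
  omega

-- one chunk step of emit from a 64-boundary index
theorem emit_split (l : List Int) (hl : l ≠ []) (i : Int)
    (hmod : PySem.Int.mod i 64 = 0) :
    emit i l = (if i = 0 then "\"0x".toList else "\", \"0x".toList)
      ++ (l.take 64).flatMap hp ++ emit (i + (l.take 64).length) (l.drop 64) := by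
  cases l with
  | nil => exact absurd rfl hl
  | cons a xs =>
    rw [emit]
    have hsep : (if i = 0 then "\"0x".toList
        else if PySem.Int.mod i 64 = 0 then "\", \"0x".toList else [])
        = (if i = 0 then "\"0x".toList else "\", \"0x".toList) := by
      by_cases h0 : i = 0
      · simp [h0]
      · rw [if_neg h0, if_neg h0, if_pos hmod]
    rw [hsep]
    conv_lhs => rw [show xs = xs.take 63 ++ xs.drop 63 from (List.take_append_drop 63 xs).symm]
    rw [emit_no_sep (xs.take 63) (i + 1) (xs.drop 63)
      (fun j hj => by
        have hlen : (xs.take 63).length ≤ 63 := by simp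
        have := mod64_ne i hmod (j + 1) (by omega) (by omega)
        have harith : i + 1 + (j : Int) = i + ((j + 1 : Nat) : Int) := by push_cast; ring
        rw [harith]; exact this)]
    rw [show (64 : Nat) = 63 + 1 from rfl, List.take_succ_cons, List.drop_succ_cons]
    have hidx : i + 1 + ((xs.take 63).length : Int)
        = i + (((a :: xs.take 63).length : Nat) : Int) := by
      simp only [List.length_cons]; push_cast; ring
    simp [List.flatMap_cons, List.append_assoc]
    congr 1
    ring

-- the tail chunks: emit from a positive 64-boundary index, closing quote appended
theorem emit_tail :
    ∀ (l : List Int), l ≠ [] → ∀ k : Nat,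
      emit ((64 * (k + 1) : Nat) : Int) l ++ ['"'] = '"' :: ',' :: ' ' :: J63 l := by
  intro l
  induction hn : l.length using Nat.strong_induction_on generalizing l with
  | _ n ih =>
    subst hn
    intro hl k
    have hi0 : ((64 * (k + 1) : Nat) : Int) ≠ 0 := by push_cast; omega
    rw [emit_split l hl _ (mod64_boundary k), if_neg hi0, J63,
      chunksOf_eq_cons 63 l hl, show (63 + 1 : Nat) = 64 from rfl]
    by_cases hd : l.drop 64 = []
    · rw [hd, chunksOf_nil, List.map_cons, List.map_nil, PySem.Chars.join_singleton]
      simp [emit]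
    · have hlen : 64 < l.length := by
        by_contra hcon
        exact hd (List.drop_eq_nil_of_le (by omega))
      have htk : (l.take 64).length = 64 := by simp; omega
      have hidx : ((64 * (k + 1) : Nat) : Int) + ((l.take 64).length : Int)
          = ((64 * (k + 1 + 1) : Nat) : Int) := by rw [htk]; push_cast; ring
      rw [hidx]
      have hihm := ih (l.drop 64).length (by simp; omega) (l.drop 64) rfl hd (k + 1)
      rw [J63] at hihm
      rw [chunksOf_eq_cons 63 (l.drop 64) hd, show (63 + 1 : Nat) = 64 from rfl] at hihm ⊢
      rw [List.map_cons, List.map_cons, PySem.Chars.join_cons_cons]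
      rw [List.map_cons] at hihm
      simp only [List.append_assoc, List.cons_append, List.nil_append] at hihm ⊢
      rw [hihm]
      simp

-- the head chunk: emit from index 0 with closing quote is A's join of quoted chunks
theorem emit_head (l : List Int) :
    emit 0 l ++ (if l = [] then [] else ['"']) = J63 l := by
  by_cases hl : l = []
  · subst hl
    simp [emit, J63, chunksOf_nil]
  · have hmod0 : PySem.Int.mod (0 : Int) 64 = 0 := by
      rw [PySem.Int.mod_eq_emod_of_pos (by norm_num)]
      simp
    rw [if_neg hl, emit_split l hl 0 hmod0, if_pos rfl, J63,
      chunksOf_eq_cons 63 l hl, show (63 + 1 : Nat) = 64 from rfl]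
    by_cases hd : l.drop 64 = []
    · rw [hd, chunksOf_nil, List.map_cons, List.map_nil, PySem.Chars.join_singleton]
      simp [emit]
    · have hlen : 64 < l.length := by
        by_contra hcon
        exact hd (List.drop_eq_nil_of_le (by omega))
      have htk : (l.take 64).length = 64 := by simp; omega
      have hidx : (0 : Int) + ((l.take 64).length : Int) = ((64 * (0 + 1) : Nat) : Int) := by
        rw [htk]; norm_num
      rw [hidx]
      have hihm := emit_tail (l.drop 64) hd 0
      rw [J63] at hihm
      rw [chunksOf_eq_cons 63 (l.drop 64) hd, show (63 + 1 : Nat) = 64 from rfl] at hihm ⊢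
      rw [List.map_cons, List.map_cons, PySem.Chars.join_cons_cons]
      rw [List.map_cons] at hihm
      simp only [List.append_assoc, List.cons_append, List.nil_append] at hihm ⊢
      rw [hihm]
      simp

-- ===== VERDICT (by name: the statement is the Claim_ definition above) =====
theorem schema_v3_spec : Claim_equal_schema_v3 := by
  intro payload _
  unfold Spec_schema_v3 schema_v3 schema_v3_alt
  simp only []
  congr 1
  congr 1
  congr 1
  rw [foldl_append_map, List.nil_append,
    pyRange_slice_chunks 64 (by norm_num) 64 (by norm_num) (payload.map (fun b => Int.land b 255)),
    chunksOf_map, List.map_map]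
  rw [foldl_enumerate_emit payload 0 [], List.nil_append, emit_head payload, J63,
    show (64 - 1 : Nat) = 63 from rfl]
  congr 1
  apply List.map_congr_left
  intro ck _
  simp [Function.comp, List.flatMap_map]
  rfl
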